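-- pv_equiv track=rewrite | github.com/whatshap/whatshap | whatshap/polyphase/threading.py | compute_haplotypes
-- ===== SOURCE A (Python) =====
-- from collections import defaultdict
--
-- def compute_haplotypes(path, consensus_lists, ploidy):
--     """
--     Fills each haplotypes using the computed clusters and their consensus lists
--     """
--     haplotypes = [[] for _ in range(ploidy)]
--
--     for pos in range(len(path)):
--         cnts = defaultdict(int)
--         for i in range(ploidy):
--             cid = path[pos][i]
--             if cid in consensus_lists[pos]:
--                 allele = consensus_lists[pos][cid][cnts[cid]]
--             else:
--                 allele = -1
--             cnts[cid] += 1
--             haplotypes[i].append(allele)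
--
--     return haplotypes
-- ===== SOURCE B (Python) =====
-- def compute_haplotypes(path, consensus_lists, ploidy):
--     """
--     Group-and-scatter: per position, bucket the slot indices by their cluster
--     id (one dict of index lists), then hand the consensus alleles of each
--     cluster out to its slots in order: the k-th slot of cluster cid receives
--     consensus_lists[pos][cid][k] (or -1 when cid has no consensus list).
--     """
--     haplotypes = [[] for _ in range(ploidy)]
--     for pos in range(len(path)):
--         row = path[pos]
--         cons = consensus_lists[pos]
--         groups = {}
--         for i in range(ploidy):
--             groups.setdefault(row[i], []).append(i)
--         for cid, slots in groups.items():
--             alleles = cons.get(cid)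
--             for k, i in enumerate(slots):
--                 haplotypes[i].append(alleles[k] if alleles is not None else -1)
--     return haplotypes
-- ===== Notes on version B (the rewrite author's own statement) =====
-- stated objective: alternative
-- what changed: B replaces A's per-slot scan with a running occurrence counter by a two-phase group-and-scatter per position: it buckets the slot indices by cluster id into a dict of index lists, then iterates the groups and hands each cluster's consensus alleles out to its slots in order (k-th slot of a group gets consensus[cid][k], or -1 when the cluster has no consensus list).
-- outside the precondition, e.g. on compute_haplotypes([[1]], [], -1): A returns [], B raises IndexError
import Mathlib
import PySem

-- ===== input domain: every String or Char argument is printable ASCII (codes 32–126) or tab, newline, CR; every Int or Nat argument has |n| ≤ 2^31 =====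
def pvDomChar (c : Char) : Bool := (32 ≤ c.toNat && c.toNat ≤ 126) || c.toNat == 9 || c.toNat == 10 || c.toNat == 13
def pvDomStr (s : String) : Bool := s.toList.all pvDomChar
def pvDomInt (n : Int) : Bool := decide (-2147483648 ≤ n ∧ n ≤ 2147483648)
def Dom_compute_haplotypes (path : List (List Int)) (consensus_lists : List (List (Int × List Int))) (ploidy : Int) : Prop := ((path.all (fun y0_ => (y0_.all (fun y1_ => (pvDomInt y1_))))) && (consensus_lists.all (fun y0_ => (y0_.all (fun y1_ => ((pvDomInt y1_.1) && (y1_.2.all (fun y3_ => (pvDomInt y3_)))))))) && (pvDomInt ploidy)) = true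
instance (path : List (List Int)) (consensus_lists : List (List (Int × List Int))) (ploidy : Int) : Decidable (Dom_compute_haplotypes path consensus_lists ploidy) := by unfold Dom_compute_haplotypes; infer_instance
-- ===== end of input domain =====

-- B replaces A's per-slot scan with a running occurrence counter by a per-position group-and-scatter:
-- it buckets the slot indices by cluster id into a dict of index lists, then hands each cluster's
-- consensus alleles out to its slots in order; same value on Pre_ (objective: alternative).

-- ===== PORT A =====
def compute_haplotypes (path : List (List Int)) (consensus_lists : List (List (Int × List Int))) (ploidy : Int) : List (List Int) :=
  let haplotypes : List (List Int) := (PySem.List.pyRange 0 ploidy 1).map (fun _ => ([] : List Int))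
  (PySem.List.pyRange 0 (path.length : Int) 1).foldl (fun haps pos =>
    ((PySem.List.pyRange 0 ploidy 1).foldl
      (fun (st : PySem.Dict Int Int × List (List Int)) i =>
        let cnts := st.1
        let cid := PySem.List.pyGetD (PySem.List.pyGetD path pos []) i 0
        let allele : Int :=
          match PySem.Dict.get? (PySem.Dict.mk (PySem.List.pyGetD consensus_lists pos [])) cid with
          | some lst => PySem.List.pyGetD lst (PySem.Dict.getD cnts cid 0) (-1)
          | none => -1
        (PySem.Dict.modify cnts cid 0 (· + 1), st.2.modify i.toNat (fun h => h ++ [allele])))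
      (PySem.Dict.empty, haps)).2) haplotypes

-- ===== PORT B =====
def compute_haplotypes_alt (path : List (List Int)) (consensus_lists : List (List (Int × List Int))) (ploidy : Int) : List (List Int) :=
  let haplotypes : List (List Int) := (PySem.List.pyRange 0 ploidy 1).map (fun _ => ([] : List Int))
  (PySem.List.pyRange 0 (path.length : Int) 1).foldl (fun haps pos =>
    let row := PySem.List.pyGetD path pos []
    let cons := PySem.Dict.mk (PySem.List.pyGetD consensus_lists pos [])
    -- groups: cluster id -> list of slot indices holding it (insertion-ordered dict of buckets)
    let groups : PySem.Dict Int (List Int) :=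
      (PySem.List.pyRange 0 ploidy 1).foldl
        (fun g i => PySem.Dict.modify g (PySem.List.pyGetD row i 0) [] (fun l => l ++ [i]))
        PySem.Dict.empty
    -- scatter: the k-th slot of cluster cid receives cons[cid][k] (or -1 when cid has no list)
    groups.items.foldl (fun haps2 pr =>
      let alleles := PySem.Dict.get? cons pr.1
      (PySem.List.enumerate pr.2).foldl (fun h ki =>
        h.modify ki.2.toNat (fun r => r ++
          [match alleles with
           | some lst => PySem.List.pyGetD lst ki.1 (-1)
           | none => -1])) haps2) haps) haplotypes

-- ===== PRECONDITION & SPEC =====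
-- Pre_ excludes the inputs where the Python A raises an IndexError (consensus_lists shorter than
-- path, a path row shorter than ploidy, or a consensus allele list shorter than the occurrence
-- count of its cluster id among the first ploidy entries of its row); with ploidy <= 0 and
-- consensus_lists shorter than path A returns the empty list without ever reading consensus_lists,
-- while B reads consensus_lists[pos] unconditionally and itself raises IndexError there.
def Pre_compute_haplotypes (path : List (List Int)) (consensus_lists : List (List (Int × List Int))) (ploidy : Int) : Prop :=
  path.length ≤ consensus_lists.length ∧
  ∀ pr ∈ path.zip consensus_lists,
    ploidy ≤ (pr.1.length : Int) ∧
    ∀ cid ∈ pr.1.take ploidy.toNat,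
      ∀ lst ∈ (PySem.Dict.get? (PySem.Dict.mk pr.2) cid).toList,
        (pr.1.take ploidy.toNat).count cid ≤ lst.length
instance (path : List (List Int)) (consensus_lists : List (List (Int × List Int))) (ploidy : Int) : Decidable (Pre_compute_haplotypes path consensus_lists ploidy) := by unfold Pre_compute_haplotypes; infer_instance

def pvWitness_compute_haplotypes : List (List Int) × (List (List (Int × List Int))) × Int :=
  ([[1, 2, 1], [3, 3, 0]], [[(1, [4, 5]), (2, [6])], [(3, [7, 8])]], 3)

def Spec_compute_haplotypes (path : List (List Int)) (consensus_lists : List (List (Int × List Int))) (ploidy : Int) (out : List (List Int)) : Prop := out = compute_haplotypes_alt path consensus_lists ploidy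
instance (path : List (List Int)) (consensus_lists : List (List (Int × List Int))) (ploidy : Int) (out : List (List Int)) : Decidable (Spec_compute_haplotypes path consensus_lists ploidy out) := by unfold Spec_compute_haplotypes; infer_instance

-- ===== CLAIM (what is proved, stated in full; the proofs are below) =====
def Claim_equal_compute_haplotypes : Prop := ∀ (path : List (List Int)) (consensus_lists : List (List (Int × List Int))) (ploidy : Int), Dom_compute_haplotypes path consensus_lists ploidy → Pre_compute_haplotypes path consensus_lists ploidy → Spec_compute_haplotypes path consensus_lists ploidy (compute_haplotypes path consensus_lists ploidy)

-- ===== LEMMAS AND PROOFS =====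

-- the allele both programs deliver to slot i of a position (row, cons):
-- consensus entry of cluster row[i] at index (number of earlier slots holding row[i])
def chAllele (row : List Int) (cons : List (Int × List Int)) (i : Nat) : Int :=
  match PySem.Dict.get? (PySem.Dict.mk cons) (row.getD i 0) with
  | some lst => lst.getD ((row.take i).count (row.getD i 0)) (-1)
  | none => -1

def chCol (row : List Int) (cons : List (Int × List Int)) (p : Nat) : List Int :=
  (List.range p).map (chAllele row cons)

-- appending one column to the haplotype rows
def chApp (hs : List (List Int)) (c : List Int) : List (List Int) :=
  List.zipWith (fun h a => h ++ [a]) hs c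

lemma chZipPre (l1 : List (List Int)) (P : List Int → Prop) :
    ∀ (l2 : List (List (Int × List Int))), l1.length ≤ l2.length →
    (∀ pr ∈ l1.zip l2, P pr.1) → ∀ row ∈ l1, P row := by
  induction l1 with
  | nil => intro l2 _ _ row hr; simp at hr
  | cons a t ih =>
    intro l2 hlen h row hr
    cases l2 with
    | nil => exact absurd hlen (by simp)
    | cons b t2 =>
      rcases List.mem_cons.mp hr with rfl | hmem
      · exact h (row, b) (by rw [List.zip_cons_cons]; exact List.mem_cons_self ..)
      · exact ih t2 (by simp at hlen ⊢; omega)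
          (fun pr hpr => h pr (by rw [List.zip_cons_cons]; exact List.mem_cons_of_mem _ hpr)) row hmem

lemma foldl_chApp_char : ∀ (cols hs : List (List Int)), (∀ c ∈ cols, c.length = hs.length) →
    cols.foldl chApp hs = (List.range hs.length).map (fun i => hs.getD i [] ++ cols.map (fun c => c.getD i 0)) := by
  intro cols
  induction cols with
  | nil =>
    intro hs _
    apply List.ext_getElem
    · simp
    · intro i hi hi2
      simp only [List.foldl_nil, List.map_nil, List.append_nil, List.getElem_map, List.getElem_range]
      rw [List.getD_eq_getElem hs ([] : List Int) (by simpa using hi)]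
      rfl
  | cons c cols ih =>
    intro hs h
    have hc : c.length = hs.length := h c (List.mem_cons_self ..)
    have hlen : (chApp hs c).length = hs.length := by
      simp [chApp, hc]
    rw [List.foldl_cons, ih (chApp hs c) (by
      intro c' hc'; rw [hlen]; exact h c' (List.mem_cons_of_mem _ hc')), hlen]
    apply List.map_congr_left
    intro i hi
    simp only [List.mem_range] at hi
    have hic : i < c.length := hc ▸ hi
    have hizip : i < (chApp hs c).length := hlen ▸ hi
    rw [List.getD_eq_getElem _ _ hizip, List.getD_eq_getElem _ _ hi, List.map_cons,
      List.getD_eq_getElem _ _ hic]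
    simp only [chApp]
    rw [List.getElem_zipWith]
    simp [List.append_assoc]

-- the inner per-position loop of A appends the common column's alleles to rows s, s+1, …, the counter holding prefix-counts
lemma inner_fold (row : List Int) (cons : List (Int × List Int)) :
    ∀ (n s : Nat) (d : PySem.Dict Int Int) (hs : List (List Int)),
    s + n ≤ row.length → s + n ≤ hs.length →
    (∀ c : Int, d.getD c 0 = ((row.take s).count c : Int)) →
    (((List.range n).map (fun k => ((s + k : Nat) : Int))).foldl
      (fun (st : PySem.Dict Int Int × List (List Int)) i =>
        let cnts := st.1
        let cid := PySem.List.pyGetD row i 0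
        let allele : Int :=
          match PySem.Dict.get? (PySem.Dict.mk cons) cid with
          | some lst => PySem.List.pyGetD lst (PySem.Dict.getD cnts cid 0) (-1)
          | none => -1
        (PySem.Dict.modify cnts cid 0 (· + 1), st.2.modify i.toNat (fun h => h ++ [allele])))
      (d, hs)).2
    = hs.take s
      ++ List.zipWith (fun h a => h ++ [a]) ((hs.drop s).take n) ((List.range n).map (fun k => chAllele row cons (s + k)))
      ++ hs.drop (s + n) := by
  intro n
  induction n with
  | zero =>
    intro s d hs _ _ _
    simp [List.take_append_drop]
  | succ n ih =>
    intro s d hs hrow hhs hd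
    have hslt : s < row.length := by omega
    have hshs : s < hs.length := by omega
    have hidx : (List.range (n + 1)).map (fun k => ((s + k : Nat) : Int))
        = ((s : Nat) : Int) :: (List.range n).map (fun k => ((s + 1 + k : Nat) : Int)) := by
      rw [List.range_succ_eq_map, List.map_cons, List.map_map]
      refine List.cons_eq_cons.mpr ⟨by simp, ?_⟩
      apply List.map_congr_left
      intro k _
      simp only [Function.comp_def]
      have hsk : s + (k + 1) = s + 1 + k := by omega
      rw [hsk]
    rw [hidx, List.foldl_cons]
    have hcid : PySem.List.pyGetD row ((s : Nat) : Int) 0 = row.getD s 0 := by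
      simp [PySem.List.pyGetD_natCast]
    have hstep :
        (let cnts := (d, hs).1
         let cid := PySem.List.pyGetD row ((s : Nat) : Int) 0
         let allele : Int :=
           match PySem.Dict.get? (PySem.Dict.mk cons) cid with
           | some lst => PySem.List.pyGetD lst (PySem.Dict.getD cnts cid 0) (-1)
           | none => -1
         ((PySem.Dict.modify cnts cid 0 (· + 1), (d, hs).2.modify ((s : Nat) : Int).toNat (fun h => h ++ [allele])) :
           PySem.Dict Int Int × List (List Int)))
        = (PySem.Dict.modify d (row.getD s 0) 0 (· + 1),
           hs.modify s (fun h => h ++ [chAllele row cons s])) := by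
      dsimp only
      simp only [hcid, Int.toNat_natCast, hd, PySem.List.pyGetD_natCast]
      rfl
    rw [hstep]
    have hd' : ∀ c : Int,
        (PySem.Dict.modify d (row.getD s 0) 0 (· + 1)).getD c 0 = ((row.take (s + 1)).count c : Int) := by
      intro c
      rw [PySem.Dict.getD_modify]
      have htake : row.take (s + 1) = row.take s ++ [row[s]] := by
        rw [List.take_add_one, List.getElem?_eq_getElem hslt]
        rfl
      rw [htake, List.count_append, List.getD_eq_getElem _ _ hslt]
      by_cases hcc : c = row[s]
      · rw [if_pos hcc, hd, hcc]
        have h1 : List.count (row[s]) [row[s]] = 1 := by simp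
        rw [h1]
        push_cast
        ring
      · rw [if_neg hcc, hd]
        have h1 : List.count c [row[s]] = 0 := List.count_eq_zero.mpr (by simp [hcc])
        rw [h1]
        simp
    rw [ih (s + 1) (PySem.Dict.modify d (row.getD s 0) 0 (· + 1))
      (hs.modify s (fun h => h ++ [chAllele row cons s])) (by omega)
      (by rw [List.length_modify]; omega) hd']
    have hP : hs.modify s (fun h => h ++ [chAllele row cons s])
        = (hs.take s ++ [hs[s] ++ [chAllele row cons s]]) ++ hs.drop (s + 1) := by
      rw [List.modify_eq_take_cons_drop hshs]
      simp
    have hPlen : (hs.take s ++ [hs[s] ++ [chAllele row cons s]]).length = s + 1 := by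
      simp [List.length_take]
      omega
    rw [hP, List.take_left' hPlen, List.drop_left' hPlen]
    have hdr : ((hs.take s ++ [hs[s] ++ [chAllele row cons s]]) ++ hs.drop (s + 1)).drop (s + 1 + n)
        = hs.drop (s + 1 + n) := by
      rw [← List.drop_drop (i := n) (j := s + 1)
            (l := (hs.take s ++ [hs[s] ++ [chAllele row cons s]]) ++ hs.drop (s + 1)),
          List.drop_left' hPlen, List.drop_drop]
    rw [hdr]
    have hdropc : hs.drop s = hs[s] :: hs.drop (s + 1) := List.drop_eq_getElem_cons hshs
    have hcolc : (List.range (n + 1)).map (fun k => chAllele row cons (s + k))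
        = chAllele row cons s :: (List.range n).map (fun k => chAllele row cons (s + 1 + k)) := by
      rw [List.range_succ_eq_map, List.map_cons, List.map_map]
      refine List.cons_eq_cons.mpr ⟨by simp, ?_⟩
      apply List.map_congr_left
      intro k _
      simp only [Function.comp_def]
      have hsk : s + (k + 1) = s + 1 + k := by omega
      rw [hsk]
    rw [hdropc, hcolc, List.take_succ_cons, List.zipWith_cons_cons,
        show s + (n + 1) = s + 1 + n from by omega]
    simp [List.append_assoc]

-- one outer step of A equals appending the whole column for that position
lemma outer_fold (path : List (List Int)) (consensus_lists : List (List (Int × List Int))) (ploidy : Int)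
    (hrows : ∀ row ∈ path, ploidy ≤ (row.length : Int)) :
    ∀ (m s : Nat) (hs : List (List Int)), s + m ≤ path.length → hs.length = ploidy.toNat →
    (((List.range m).map (fun k => ((s + k : Nat) : Int))).foldl
      (fun haps pos =>
        ((PySem.List.pyRange 0 ploidy 1).foldl
          (fun (st : PySem.Dict Int Int × List (List Int)) i =>
            let cnts := st.1
            let cid := PySem.List.pyGetD (PySem.List.pyGetD path pos []) i 0
            let allele : Int :=
              match PySem.Dict.get? (PySem.Dict.mk (PySem.List.pyGetD consensus_lists pos [])) cid with
              | some lst => PySem.List.pyGetD lst (PySem.Dict.getD cnts cid 0) (-1)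
              | none => -1
            (PySem.Dict.modify cnts cid 0 (· + 1), st.2.modify i.toNat (fun h => h ++ [allele])))
          (PySem.Dict.empty, haps)).2) hs)
    = ((List.range m).map (fun k =>
        chCol (path.getD (s + k) []) (consensus_lists.getD (s + k) []) ploidy.toNat)).foldl chApp hs := by
  intro m
  induction m with
  | zero => intro s hs _ _; simp
  | succ m ih =>
    intro s hs hsm hlen
    have hslt : s < path.length := by omega
    have hidx : (List.range (m + 1)).map (fun k =>
          chCol (path.getD (s + k) []) (consensus_lists.getD (s + k) []) ploidy.toNat)
        = chCol (path.getD s []) (consensus_lists.getD s []) ploidy.toNat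
          :: (List.range m).map (fun k =>
              chCol (path.getD (s + 1 + k) []) (consensus_lists.getD (s + 1 + k) []) ploidy.toNat) := by
      rw [List.range_succ_eq_map, List.map_cons, List.map_map]
      refine List.cons_eq_cons.mpr ⟨by simp, ?_⟩
      apply List.map_congr_left
      intro k _
      simp only [Function.comp_def]
      have hsk : s + (k + 1) = s + 1 + k := by omega
      rw [hsk]
    have hidxI : (List.range (m + 1)).map (fun k => ((s + k : Nat) : Int))
        = ((s : Nat) : Int) :: (List.range m).map (fun k => ((s + 1 + k : Nat) : Int)) := by
      rw [List.range_succ_eq_map, List.map_cons, List.map_map]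
      refine List.cons_eq_cons.mpr ⟨by simp, ?_⟩
      apply List.map_congr_left
      intro k _
      simp only [Function.comp_def]
      have hsk : s + (k + 1) = s + 1 + k := by omega
      rw [hsk]
    rw [hidxI, hidx, List.foldl_cons, List.foldl_cons]
    have hrowmem : PySem.List.pyGetD path ((s : Nat) : Int) [] ∈ path := by
      rw [PySem.List.pyGetD_natCast, List.getD_eq_getElem _ _ hslt]
      exact List.getElem_mem _
    have hrowlen : 0 + ploidy.toNat ≤ (PySem.List.pyGetD path ((s : Nat) : Int) []).length := by
      have h1 := hrows _ hrowmem
      omega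
    have hpr : PySem.List.pyRange 0 ploidy 1
        = (List.range ploidy.toNat).map (fun k => ((0 + k : Nat) : Int)) := by
      rw [PySem.List.pyRange_one]
      simp
    have hstep :
        ((PySem.List.pyRange 0 ploidy 1).foldl
            (fun (st : PySem.Dict Int Int × List (List Int)) i =>
              let cnts := st.1
              let cid := PySem.List.pyGetD (PySem.List.pyGetD path ((s : Nat) : Int) []) i 0
              let allele : Int :=
                match PySem.Dict.get? (PySem.Dict.mk (PySem.List.pyGetD consensus_lists ((s : Nat) : Int) [])) cid with
                | some lst => PySem.List.pyGetD lst (PySem.Dict.getD cnts cid 0) (-1)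
                | none => -1
              (PySem.Dict.modify cnts cid 0 (· + 1), st.2.modify i.toNat (fun h => h ++ [allele])))
            (PySem.Dict.empty, hs)).2
        = chApp hs (chCol (path.getD s []) (consensus_lists.getD s []) ploidy.toNat) := by
      rw [hpr, inner_fold (PySem.List.pyGetD path ((s : Nat) : Int) [])
            (PySem.List.pyGetD consensus_lists ((s : Nat) : Int) []) ploidy.toNat 0
            PySem.Dict.empty hs hrowlen (by omega)
            (by intro c; simp [PySem.Dict.getD, PySem.Dict.get?_empty])]
      simp only [List.take_zero, List.drop_zero, Nat.zero_add]
      rw [List.take_of_length_le (by omega), List.drop_eq_nil_of_le (by omega)]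
      simp only [PySem.List.pyGetD_natCast]
      simp [chApp, chCol]
    rw [hstep]
    have hlen' : (chApp hs (chCol (path.getD s []) (consensus_lists.getD s []) ploidy.toNat)).length
        = ploidy.toNat := by
      simp [chApp, chCol, hlen]
    exact ih (s + 1) _ (by omega) hlen'

-- ---- B-side lemmas ----

-- the uniform scatter step: deliver value u.2 to row u.1
def chUStep (h : List (List Int)) (u : Nat × Int) : List (List Int) :=
  h.modify u.1 (fun r => r ++ [u.2])

lemma chUFold_length (U : List (Nat × Int)) : ∀ hs : List (List Int),
    (U.foldl chUStep hs).length = hs.length := by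
  induction U with
  | nil => intro hs; rfl
  | cons u t ih => intro hs; rw [List.foldl_cons, ih]; simp [chUStep, List.length_modify]

lemma chUFold_getD (U : List (Nat × Int)) : ∀ (hs : List (List Int)) (j : Nat), j < hs.length →
    (U.foldl chUStep hs).getD j [] = hs.getD j [] ++ (U.filter (fun u => u.1 == j)).map (·.2) := by
  induction U with
  | nil => intro hs j _; simp
  | cons u t ih =>
    intro hs j hj
    rw [List.foldl_cons, ih (chUStep hs u) j (by simp [chUStep, List.length_modify]; omega)]
    have hju : j < (hs.modify u.1 (fun r => r ++ [u.2])).length := by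
      rw [List.length_modify]; exact hj
    by_cases h : u.1 = j
    · rw [List.filter_cons_of_pos (by simp [h]), List.map_cons]
      simp only [chUStep]
      rw [List.getD_eq_getElem _ _ hju, List.getElem_modify, if_pos h,
        List.getD_eq_getElem _ _ hj]
      simp
    · rw [List.filter_cons_of_neg (by simp [h])]
      simp only [chUStep]
      rw [List.getD_eq_getElem _ _ hju, List.getElem_modify, if_neg h,
        List.getD_eq_getElem _ _ hj]

-- a flatMap over distinct keys in which only one key contributes, with a singleton
lemma chFlatSingle (K : List Int) (f : Int → List (Nat × Int)) (c0 : Int) (x : Nat × Int) :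
    K.Nodup → c0 ∈ K → f c0 = [x] → (∀ c ∈ K, c ≠ c0 → f c = []) →
    K.flatMap f = [x] := by
  induction K with
  | nil => intro _ h; simp at h
  | cons a t ih =>
    intro hnd hmem hf0 hrest
    rw [List.flatMap_cons]
    rcases List.mem_cons.mp hmem with rfl | hmt
    · have ht : ∀ c ∈ t, f c = [] := by
        intro c hc
        exact hrest c (List.mem_cons_of_mem _ hc)
          (fun he => (List.nodup_cons.mp hnd).1 (he ▸ hc))
      rw [hf0, List.flatMap_eq_nil_iff.mpr ht, List.append_nil]
    · have ha : f a = [] :=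
        hrest a (List.mem_cons_self ..) (fun he => (List.nodup_cons.mp hnd).1 (he ▸ hmt))
      rw [ha, List.nil_append]
      exact ih (List.nodup_cons.mp hnd).2 hmt hf0
        (fun c hc => hrest c (List.mem_cons_of_mem _ hc))

-- prefix-count of c among the first j slots, as a filter over range j
lemma chCountPrefix (row : List Int) (c : Int) :
    ∀ j, j ≤ row.length →
    ((List.range j).filter (fun k => row.getD k 0 == c)).length = (row.take j).count c := by
  intro j
  induction j with
  | zero => intro _; simp
  | succ j ih =>
    intro hj
    have hjl : j < row.length := by omega
    have hget : row.getD j 0 = row[j] := List.getD_eq_getElem _ _ hjl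
    rw [List.range_succ, List.filter_append, List.length_append, ih (by omega),
      List.take_add_one, List.getElem?_eq_getElem hjl]
    simp only [Option.toList_some, List.count_append]
    congr 1
    by_cases h : row[j] = c
    · rw [List.filter_cons_of_pos (by simp [List.getElem?_eq_getElem hjl, h]), List.filter_nil]
      simp [h]
    · rw [List.filter_cons_of_neg (by simp [List.getElem?_eq_getElem hjl, h]), List.filter_nil]
      rw [List.length_nil, List.count_eq_zero.mpr (by
        simp only [List.mem_singleton]
        exact fun he => h he.symm)]

-- the whole per-position group-and-scatter step of B equals appending the common column
lemma chScatter (row : List Int) (cons : List (Int × List Int)) (p : Nat)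
    (hp : p ≤ row.length) (haps : List (List Int)) (hlen : haps.length = p) :
    ((((List.range p).map (fun k => ((k : Nat) : Int))).foldl
        (fun g i => PySem.Dict.modify g (PySem.List.pyGetD row i 0) [] (fun l => l ++ [i]))
        (PySem.Dict.empty : PySem.Dict Int (List Int))).items.foldl
      (fun haps2 pr =>
        let alleles := PySem.Dict.get? (PySem.Dict.mk cons) pr.1
        (PySem.List.enumerate pr.2).foldl (fun h ki =>
          h.modify ki.2.toNat (fun r => r ++
            [match alleles with
             | some lst => PySem.List.pyGetD lst ki.1 (-1)
             | none => -1])) haps2) haps)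
    = chApp haps (chCol row cons p) := by
  set idx : List Int := (List.range p).map (fun k => ((k : Nat) : Int)) with hidxdef
  set G : PySem.Dict Int (List Int) :=
    idx.foldl (fun g i => PySem.Dict.modify g (PySem.List.pyGetD row i 0) [] (fun l => l ++ [i]))
      PySem.Dict.empty with hGdef
  -- value delivered to the k-th slot of cluster c
  set val : Int → Int → Int := fun c t =>
    match PySem.Dict.get? (PySem.Dict.mk cons) c with
    | some lst => PySem.List.pyGetD lst t (-1)
    | none => -1 with hvaldef
  -- (1) the groups dict, characterised
  have hGfold : G = (idx.map (fun i => (PySem.List.pyGetD row i 0, i))).foldl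
      (fun d pr => d.modify pr.1 [] (fun l => l ++ [pr.2])) PySem.Dict.empty := by
    conv_rhs => rw [List.foldl_map]
  have hKeys : G.keys = PySem.Set.ofList (idx.map (fun i => PySem.List.pyGetD row i 0)) := by
    rw [hGdef, PySem.Dict.keys_foldl_modify_key idx (fun i => PySem.List.pyGetD row i 0) []
      (fun _ i l => l ++ [i]) PySem.Dict.empty]
    rfl
  have hNd : G.keys.Nodup := by
    rw [hKeys]; exact PySem.Set.nodup_ofList _
  have hGetD : ∀ c : Int, G.getD c [] = idx.filter (fun i => PySem.List.pyGetD row i 0 == c) := by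
    intro c
    rw [hGfold, PySem.Dict.getD_foldl_modify_append, PySem.Dict.getD_empty, List.nil_append,
      List.filter_map, List.map_map]
    simp [Function.comp_def]
  have hItems : G.items = G.keys.map (fun c => (c, idx.filter (fun i => PySem.List.pyGetD row i 0 == c))) := by
    rw [PySem.Dict.items_eq_map_keys G hNd ([] : List Int)]
    apply List.map_congr_left
    intro c _
    rw [hGetD]
  -- (2) the scatter, flattened to a single fold of uniform updates
  have hinner : ∀ (pr : Int × List Int) (hs : List (List Int)),
      ((PySem.List.enumerate pr.2).foldl (fun h ki =>
        h.modify ki.2.toNat (fun r => r ++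
          [match PySem.Dict.get? (PySem.Dict.mk cons) pr.1 with
           | some lst => PySem.List.pyGetD lst ki.1 (-1)
           | none => -1])) hs)
      = ((PySem.List.enumerate pr.2).map (fun ki => (ki.2.toNat, val pr.1 ki.1))).foldl chUStep hs := by
    intro pr hs
    rw [List.foldl_map]
    rfl
  have hflat : (G.items.foldl (fun haps2 pr =>
        let alleles := PySem.Dict.get? (PySem.Dict.mk cons) pr.1
        (PySem.List.enumerate pr.2).foldl (fun h ki =>
          h.modify ki.2.toNat (fun r => r ++
            [match alleles with
             | some lst => PySem.List.pyGetD lst ki.1 (-1)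
             | none => -1])) haps2) haps)
      = (G.items.flatMap (fun pr => (PySem.List.enumerate pr.2).map (fun ki => (ki.2.toNat, val pr.1 ki.1)))).foldl
          chUStep haps := by
    have h1 := PySem.List.foldl_congr_mem (l := G.items) (init := haps)
      (f := fun haps2 pr =>
        let alleles := PySem.Dict.get? (PySem.Dict.mk cons) pr.1
        (PySem.List.enumerate pr.2).foldl (fun h ki =>
          h.modify ki.2.toNat (fun r => r ++
            [match alleles with
             | some lst => PySem.List.pyGetD lst ki.1 (-1)
             | none => -1])) haps2)
      (g := fun haps2 pr =>
        ((PySem.List.enumerate pr.2).map (fun ki => (ki.2.toNat, val pr.1 ki.1))).foldl chUStep haps2)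
      (fun hs pr _ => hinner pr hs)
    rw [h1, List.foldl_flatMap]
  rw [hflat]
  -- (3) the filtered update list at each slot j is the single expected delivery
  set U : List (Nat × Int) :=
    G.items.flatMap (fun pr => (PySem.List.enumerate pr.2).map (fun ki => (ki.2.toNat, val pr.1 ki.1))) with hUdef
  have hslotsmem : ∀ (c : Int) (x : Int), x ∈ idx.filter (fun i => PySem.List.pyGetD row i 0 == c) →
      ∃ k : Nat, x = (k : Int) ∧ k < p ∧ row.getD k 0 = c := by
    intro c x hx
    have hx1 := List.mem_filter.mp hx
    have hx2 : x ∈ (List.range p).map (fun k => ((k : Nat) : Int)) := by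
      rw [← hidxdef]; exact hx1.1
    obtain ⟨k, hk, rfl⟩ := List.mem_map.mp hx2
    refine ⟨k, rfl, List.mem_range.mp hk, ?_⟩
    have := hx1.2
    rwa [PySem.List.pyGetD_natCast, beq_iff_eq] at this
  have hUfilter : ∀ j : Nat, j < p →
      U.filter (fun u => u.1 == j) = [(j, chAllele row cons j)] := by
    intro j hj
    rw [hUdef, hItems, List.flatMap_map, List.filter_flatMap]
    set c0 : Int := row.getD j 0 with hc0
    apply chFlatSingle _ _ c0
    · exact hKeys ▸ hNd
    · rw [hKeys, PySem.Set.mem_ofList]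
      refine List.mem_map.mpr ⟨((j : Nat) : Int), ?_, by rw [PySem.List.pyGetD_natCast]⟩
      rw [hidxdef]
      exact List.mem_map.mpr ⟨j, List.mem_range.mpr hj, rfl⟩
    · -- the bucket of c0 delivers exactly one entry to slot j, with the right allele
      set Q : Nat → Bool := fun k => row.getD k 0 == c0 with hQ
      have hslots : idx.filter (fun i => PySem.List.pyGetD row i 0 == c0)
          = ((List.range p).filter Q).map (fun k => ((k : Nat) : Int)) := by
        rw [hidxdef, List.filter_map]
        congr 1
        apply List.filter_congr
        intro k _
        simp [PySem.List.pyGetD_natCast, hQ]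
      have hsplit : List.range p = List.range j ++ [j] ++ (List.range (p - (j + 1))).map (fun x => (j + 1) + x) := by
        conv_lhs => rw [show p = (j + 1) + (p - (j + 1)) from by omega]
        rw [List.range_add, List.range_succ]
      have hQj : Q j = true := by simp [hQ, hc0]
      have hF : (List.range p).filter Q
          = (List.range j).filter Q ++ [j] ++ ((List.range (p - (j + 1))).map (fun x => (j + 1) + x)).filter Q := by
        rw [hsplit, List.filter_append, List.filter_append, List.filter_cons_of_pos hQj]
        rfl
      set A1 : List Nat := (List.range j).filter Q with hA1
      set B1 : List Nat := ((List.range (p - (j + 1))).map (fun x => (j + 1) + x)).filter Q with hB1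
      have hA1lt : ∀ k ∈ A1, k < j := by
        intro k hk
        have := (List.mem_filter.mp hk).1
        simpa using this
      have hB1gt : ∀ k ∈ B1, j < k := by
        intro k hk
        have := (List.mem_filter.mp hk).1
        obtain ⟨x, _, rfl⟩ := List.mem_map.mp this
        omega
      rw [hslots, hF]
      rw [List.map_append, List.map_append, PySem.List.enumerate_append, PySem.List.enumerate_append]
      rw [List.map_append, List.map_append, List.filter_append, List.filter_append]
      have hclean : ∀ (L : List Nat) (s : Int), (∀ k ∈ L, k ≠ j) →
          ((PySem.List.enumerate (L.map (fun k => ((k : Nat) : Int))) s).map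
            (fun ki => (ki.2.toNat, val c0 ki.1))).filter (fun u => u.1 == j) = [] := by
        intro L s hL
        rw [List.filter_eq_nil_iff]
        intro u hu
        obtain ⟨ki, hki, rfl⟩ := List.mem_map.mp hu
        obtain ⟨k, hkl, hkp⟩ := (PySem.List.mem_enumerate_iff _ _ _).mp hki
        have hkm : (L.map (fun k => ((k : Nat) : Int)))[k] ∈ L.map (fun k => ((k : Nat) : Int)) :=
          List.getElem_mem _
        obtain ⟨k0, hk0, hk0e⟩ := List.mem_map.mp hkm
        simp only [hkp, hk0e.symm]
        simp [hL k0 hk0]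
      rw [hclean A1 _ (fun k hk => by have := hA1lt k hk; omega),
          hclean B1 _ (fun k hk => by have := hB1gt k hk; omega)]
      rw [List.map_cons, List.map_nil, PySem.List.enumerate_cons, List.map_cons,
        List.filter_cons_of_pos (by simp)]
      simp only [PySem.List.enumerate_nil, List.map_nil, List.filter_nil, List.append_nil,
        List.nil_append]
      have hA1len : A1.length = (row.take j).count c0 := by
        rw [hA1, hQ]
        exact chCountPrefix row c0 j (by omega)
      have hlenmap : ((A1.map (fun k => ((k : Nat) : Int)))).length = A1.length := List.length_map ..
      refine List.cons_eq_cons.mpr ⟨?_, rfl⟩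
      refine Prod.ext (by simp) ?_
      show val c0 (0 + ↑(A1.map (fun k => ((k : Nat) : Int))).length) = chAllele row cons j
      rw [hlenmap, hA1len]
      simp only [hvaldef, chAllele, hc0, Int.zero_add]
      cases PySem.Dict.get? (PySem.Dict.mk cons) (row.getD j 0) with
      | none => rfl
      | some lst => simp [PySem.List.pyGetD_natCast]
    · -- every other bucket delivers nothing to slot j
      intro c hc hne
      rw [List.filter_eq_nil_iff]
      intro u hu
      obtain ⟨ki, hki, rfl⟩ := List.mem_map.mp hu
      obtain ⟨k, hkl, hkp⟩ := (PySem.List.mem_enumerate_iff _ _ _).mp hki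
      have hkm := List.getElem_mem hkl
      obtain ⟨k0, hk0e, hk0p, hk0c⟩ := hslotsmem c _ hkm
      simp only [hkp, hk0e, Int.toNat_natCast, beq_iff_eq]
      intro he
      rw [he] at hk0c
      exact hne hk0c.symm
  -- (4) conclude elementwise
  apply List.ext_getElem
  · rw [chUFold_length, hlen]
    simp [chApp, chCol, hlen]
  · intro j hj1 hj2
    have hjp : j < p := by
      have := hj2
      simp [chApp, chCol, hlen] at this
      omega
    have hjh : j < haps.length := by omega
    have hA := chUFold_getD U haps j hjh
    rw [← List.getD_eq_getElem _ ([] : List Int) hj1, ← List.getD_eq_getElem _ ([] : List Int) hj2,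
      hA, hUfilter j hjp]
    have hjcol : j < (chCol row cons p).length := by simp [chCol]; omega
    rw [List.getD_eq_getElem (l := chApp haps (chCol row cons p)) _ hj2]
    simp only [chApp]
    rw [List.getElem_zipWith]
    rw [List.getD_eq_getElem _ _ hjh, List.map_cons, List.map_nil]
    congr 1
    simp [chCol]
-- one outer pass of B equals folding the columns in
lemma chAltOuter (path : List (List Int)) (consensus_lists : List (List (Int × List Int))) (ploidy : Int)
    (hrows : ∀ row ∈ path, ploidy ≤ (row.length : Int)) :
    ∀ (m s : Nat) (hs : List (List Int)), s + m ≤ path.length → hs.length = ploidy.toNat →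
    (((List.range m).map (fun k => ((s + k : Nat) : Int))).foldl
      (fun haps pos =>
        let row := PySem.List.pyGetD path pos []
        let cons := PySem.Dict.mk (PySem.List.pyGetD consensus_lists pos [])
        let groups : PySem.Dict Int (List Int) :=
          (PySem.List.pyRange 0 ploidy 1).foldl
            (fun g i => PySem.Dict.modify g (PySem.List.pyGetD row i 0) [] (fun l => l ++ [i]))
            PySem.Dict.empty
        groups.items.foldl (fun haps2 pr =>
          let alleles := PySem.Dict.get? cons pr.1
          (PySem.List.enumerate pr.2).foldl (fun h ki =>
            h.modify ki.2.toNat (fun r => r ++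
              [match alleles with
               | some lst => PySem.List.pyGetD lst ki.1 (-1)
               | none => -1])) haps2) haps) hs)
    = ((List.range m).map (fun k =>
        chCol (path.getD (s + k) []) (consensus_lists.getD (s + k) []) ploidy.toNat)).foldl chApp hs := by
  intro m
  induction m with
  | zero => intro s hs _ _; simp
  | succ m ih =>
    intro s hs hsm hlen
    have hslt : s < path.length := by omega
    have hidx : (List.range (m + 1)).map (fun k =>
          chCol (path.getD (s + k) []) (consensus_lists.getD (s + k) []) ploidy.toNat)
        = chCol (path.getD s []) (consensus_lists.getD s []) ploidy.toNat
          :: (List.range m).map (fun k =>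
              chCol (path.getD (s + 1 + k) []) (consensus_lists.getD (s + 1 + k) []) ploidy.toNat) := by
      rw [List.range_succ_eq_map, List.map_cons, List.map_map]
      refine List.cons_eq_cons.mpr ⟨by simp, ?_⟩
      apply List.map_congr_left
      intro k _
      simp only [Function.comp_def]
      have hsk : s + (k + 1) = s + 1 + k := by omega
      rw [hsk]
    have hidxI : (List.range (m + 1)).map (fun k => ((s + k : Nat) : Int))
        = ((s : Nat) : Int) :: (List.range m).map (fun k => ((s + 1 + k : Nat) : Int)) := by
      rw [List.range_succ_eq_map, List.map_cons, List.map_map]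
      refine List.cons_eq_cons.mpr ⟨by simp, ?_⟩
      apply List.map_congr_left
      intro k _
      simp only [Function.comp_def]
      have hsk : s + (k + 1) = s + 1 + k := by omega
      rw [hsk]
    rw [hidxI, hidx, List.foldl_cons, List.foldl_cons]
    have hrowmem : PySem.List.pyGetD path ((s : Nat) : Int) [] ∈ path := by
      rw [PySem.List.pyGetD_natCast, List.getD_eq_getElem _ _ hslt]
      exact List.getElem_mem _
    have hrowlen : ploidy.toNat ≤ (PySem.List.pyGetD path ((s : Nat) : Int) []).length := by
      have h1 := hrows _ hrowmem
      omega
    have hpr : PySem.List.pyRange 0 ploidy 1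
        = (List.range ploidy.toNat).map (fun k => ((k : Nat) : Int)) := by
      rw [PySem.List.pyRange_one]
      simp
    have hstep :
        (let row := PySem.List.pyGetD path ((s : Nat) : Int) []
         let cons := PySem.Dict.mk (PySem.List.pyGetD consensus_lists ((s : Nat) : Int) [])
         let groups : PySem.Dict Int (List Int) :=
           (PySem.List.pyRange 0 ploidy 1).foldl
             (fun g i => PySem.Dict.modify g (PySem.List.pyGetD row i 0) [] (fun l => l ++ [i]))
             PySem.Dict.empty
         groups.items.foldl (fun haps2 pr =>
           let alleles := PySem.Dict.get? cons pr.1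
           (PySem.List.enumerate pr.2).foldl (fun h ki =>
             h.modify ki.2.toNat (fun r => r ++
               [match alleles with
                | some lst => PySem.List.pyGetD lst ki.1 (-1)
                | none => -1])) haps2) hs)
        = chApp hs (chCol (path.getD s []) (consensus_lists.getD s []) ploidy.toNat) := by
      dsimp only
      rw [hpr]
      rw [chScatter (PySem.List.pyGetD path ((s : Nat) : Int) [])
        (PySem.List.pyGetD consensus_lists ((s : Nat) : Int) []) ploidy.toNat hrowlen hs hlen]
      simp only [PySem.List.pyGetD_natCast]
    rw [hstep]
    have hlen' : (chApp hs (chCol (path.getD s []) (consensus_lists.getD s []) ploidy.toNat)).length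
        = ploidy.toNat := by
      simp [chApp, chCol, hlen]
    exact ih (s + 1) _ (by omega) hlen'

-- ===== VERDICT (by name: the statement is the Claim_ definition above) =====
theorem compute_haplotypes_spec : Claim_equal_compute_haplotypes := by
  intro path consensus_lists ploidy _ hpre
  obtain ⟨hlen, hzip⟩ := hpre
  unfold Spec_compute_haplotypes
  have hrows : ∀ row ∈ path, ploidy ≤ (row.length : Int) :=
    chZipPre path (fun row => ploidy ≤ (row.length : Int)) consensus_lists hlen
      (fun pr hpr => (hzip pr hpr).1)
  have hinit : ((PySem.List.pyRange 0 ploidy 1).map (fun _ => ([] : List Int)))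
      = List.replicate ploidy.toNat [] := by
    rw [PySem.List.pyRange_one]
    refine List.eq_replicate_iff.mpr ⟨by simp, ?_⟩
    intro b hb
    simp only [List.mem_map] at hb
    obtain ⟨x, _, rfl⟩ := hb
    rfl
  have hcolslen : ∀ c ∈ (List.range path.length).map (fun j =>
      chCol (path.getD j []) (consensus_lists.getD j []) ploidy.toNat), c.length = ploidy.toNat := by
    intro c hc
    obtain ⟨j, _, rfl⟩ := List.mem_map.mp hc
    simp [chCol]
  have hpr2 : PySem.List.pyRange 0 (path.length : Int) 1
      = (List.range path.length).map (fun k => ((0 + k : Nat) : Int)) := by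
    rw [PySem.List.pyRange_one]
    simp
  have hfold : ∀ (cols : List (List Int)), (∀ c ∈ cols, c.length = ploidy.toNat) →
      cols.foldl chApp (List.replicate ploidy.toNat [])
      = (List.range ploidy.toNat).map (fun i => cols.map (fun c => c.getD i 0)) := by
    intro cols hc
    rw [foldl_chApp_char _ _ (by
      intro c hcc
      rw [List.length_replicate]
      exact hc c hcc)]
    rw [List.length_replicate]
    apply List.map_congr_left
    intro i hi
    simp only [List.mem_range] at hi
    rw [List.getD_replicate _ hi]
    simp
  -- A-side characterisation
  have hA : compute_haplotypes path consensus_lists ploidy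
      = (List.range ploidy.toNat).map (fun i =>
          ((List.range path.length).map (fun j =>
            chCol (path.getD j []) (consensus_lists.getD j []) ploidy.toNat)).map (fun c => c.getD i 0)) := by
    show ((PySem.List.pyRange 0 (path.length : Int) 1).foldl (fun haps pos =>
        ((PySem.List.pyRange 0 ploidy 1).foldl
          (fun (st : PySem.Dict Int Int × List (List Int)) i =>
            let cnts := st.1
            let cid := PySem.List.pyGetD (PySem.List.pyGetD path pos []) i 0
            let allele : Int :=
              match PySem.Dict.get? (PySem.Dict.mk (PySem.List.pyGetD consensus_lists pos [])) cid with
              | some lst => PySem.List.pyGetD lst (PySem.Dict.getD cnts cid 0) (-1)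
              | none => -1
            (PySem.Dict.modify cnts cid 0 (· + 1), st.2.modify i.toNat (fun h => h ++ [allele])))
          (PySem.Dict.empty, haps)).2)
        ((PySem.List.pyRange 0 ploidy 1).map (fun _ => ([] : List Int)))) = _
    rw [hinit, hpr2, outer_fold path consensus_lists ploidy hrows path.length 0
          (List.replicate ploidy.toNat []) (by omega) (by simp)]
    simp only [Nat.zero_add]
    exact hfold _ hcolslen
  -- B-side characterisation
  have hB : compute_haplotypes_alt path consensus_lists ploidy
      = (List.range ploidy.toNat).map (fun i =>
          ((List.range path.length).map (fun j =>
            chCol (path.getD j []) (consensus_lists.getD j []) ploidy.toNat)).map (fun c => c.getD i 0)) := by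
    show ((PySem.List.pyRange 0 (path.length : Int) 1).foldl (fun haps pos =>
        let row := PySem.List.pyGetD path pos []
        let cons := PySem.Dict.mk (PySem.List.pyGetD consensus_lists pos [])
        let groups : PySem.Dict Int (List Int) :=
          (PySem.List.pyRange 0 ploidy 1).foldl
            (fun g i => PySem.Dict.modify g (PySem.List.pyGetD row i 0) [] (fun l => l ++ [i]))
            PySem.Dict.empty
        groups.items.foldl (fun haps2 pr =>
          let alleles := PySem.Dict.get? cons pr.1
          (PySem.List.enumerate pr.2).foldl (fun h ki =>
            h.modify ki.2.toNat (fun r => r ++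
              [match alleles with
               | some lst => PySem.List.pyGetD lst ki.1 (-1)
               | none => -1])) haps2) haps)
        ((PySem.List.pyRange 0 ploidy 1).map (fun _ => ([] : List Int)))) = _
    rw [hinit, hpr2, chAltOuter path consensus_lists ploidy hrows path.length 0
          (List.replicate ploidy.toNat []) (by omega) (by simp)]
    simp only [Nat.zero_add]
    exact hfold _ hcolslen
  rw [hA, hB]
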